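-- pv_equiv track=rewrite | github.com/zoetsekas/PhysioNet | src/ecg_digitization/utils/report_generator.py | _group_parameters
-- ===== SOURCE A (Python) =====
-- from typing import Dict, Any, Optional, List
--
-- def _group_parameters(params: Dict[str, str]) -> Dict[str, Dict[str, str]]:
--     """Group parameters by prefix.
--
--     Args:
--         params: Dictionary of parameters
--
--     Returns:
--         Grouped parameters
--     """
--     groups = {}
--
--     for key, value in params.items():
--         if '.' in key:
--             prefix = key.split('.')[0]
--             param_name = '.'.join(key.split('.')[1:])
--         else:
--             prefix = "General"
--             param_name = key
--
--         if prefix not in groups: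
--             groups[prefix] = {}
--         groups[prefix][param_name] = value
--
--     return groups
-- ===== SOURCE B (Python) =====
-- def _group_parameters(params):
--     """Group parameters by prefix: collect the distinct prefixes in first-occurrence
--     order, then build each group with one comprehension pass over the items."""
--     def split_key(key):
--         if '.' in key:
--             parts = key.split('.')
--             return parts[0], '.'.join(parts[1:])
--         return "General", key
--
--     prefixes = []
--     for key in params:
--         p = split_key(key)[0]
--         if p not in prefixes:
--             prefixes.append(p)
--
--     return {p: {name: value
--                 for key, value in params.items()
--                 for q, name in (split_key(key),)
--                 if q == p}
--             for p in prefixes}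
-- ===== Notes on version B (the rewrite author's own statement) =====
-- stated objective: alternative
-- what changed: Replaces the single-pass nested-dict accumulation (create-bucket-then-mutate) by a two-phase plan: first collect the distinct prefixes in first-occurrence order, then build each group's inner dict with one comprehension pass per prefix.
import Mathlib
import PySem

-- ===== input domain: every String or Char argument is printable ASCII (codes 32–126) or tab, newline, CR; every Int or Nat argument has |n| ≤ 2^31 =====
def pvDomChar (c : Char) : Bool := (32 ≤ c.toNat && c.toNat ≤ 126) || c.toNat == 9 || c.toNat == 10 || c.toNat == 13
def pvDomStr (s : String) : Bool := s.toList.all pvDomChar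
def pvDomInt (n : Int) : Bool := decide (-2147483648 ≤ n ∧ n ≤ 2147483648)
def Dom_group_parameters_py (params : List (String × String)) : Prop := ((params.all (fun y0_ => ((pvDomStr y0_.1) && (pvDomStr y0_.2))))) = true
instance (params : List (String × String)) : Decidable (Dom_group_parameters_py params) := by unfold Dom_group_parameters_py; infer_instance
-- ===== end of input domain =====

-- B changes the grouping plan (distinct-prefix list + one pass per prefix) instead of A's
-- single-pass nested-dict accumulation; alternative decomposition, same observable result.

-- ===== PORT A =====
def group_parameters_py (params : List (String × String)) : List (String × List (String × String)) :=
  let groups : PySem.Dict String (PySem.Dict String String) :=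
    params.foldl (fun groups kv =>
      let pn : String × String :=
        if PySem.Str.isIn "." kv.1 then
          -- parts = key.split('.'); (parts[0], '.'.join(parts[1:])); split? is some (sep ≠ ""),
          -- parts is nonempty, so the two getD defaults are unreachable
          let parts := (PySem.Str.split? kv.1 ".").getD []
          ((PySem.List.pyGet? parts 0).getD "", PySem.Str.join "." (parts.drop 1))
        else ("General", kv.1)
      let groups := if groups.contains pn.1 then groups else groups.insert pn.1 PySem.Dict.empty
      groups.modify pn.1 PySem.Dict.empty (fun d => d.insert pn.2 kv.2))
      PySem.Dict.empty
  groups.items.map (fun pd => (pd.1, pd.2.items))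

-- ===== PORT B =====
-- helper of Source B: split_key
def pvSplitKey (key : String) : String × String :=
  if PySem.Str.isIn "." key then
    -- parts = key.split('.'); (parts[0], '.'.join(parts[1:])); split? is some (sep ≠ ""),
    -- parts is nonempty, so the two getD defaults are unreachable
    let parts := (PySem.Str.split? key ".").getD []
    ((PySem.List.pyGet? parts 0).getD "", PySem.Str.join "." (parts.drop 1))
  else ("General", key)

def group_parameters_py_alt (params : List (String × String)) : List (String × List (String × String)) :=
  let prefixes : List String :=
    params.foldl (fun acc kv =>
      let p := (pvSplitKey kv.1).1
      if acc.contains p then acc else acc ++ [p]) []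
  prefixes.map (fun p =>
    (p, (params.foldl (fun (d : PySem.Dict String String) kv =>
          let qn := pvSplitKey kv.1
          if qn.1 == p then d.insert qn.2 kv.2 else d) PySem.Dict.empty).items))

-- ===== PRECONDITION & SPEC =====
def Spec_group_parameters_py (params : List (String × String)) (out : List (String × List (String × String))) : Prop := out = group_parameters_py_alt params
instance (params : List (String × String)) (out : List (String × List (String × String))) : Decidable (Spec_group_parameters_py params out) := by unfold Spec_group_parameters_py; infer_instance

-- ===== CLAIM (what is proved, stated in full; the proofs are below) =====
def Claim_equal_group_parameters_py : Prop := ∀ (params : List (String × String)), Dom_group_parameters_py params → Spec_group_parameters_py params (group_parameters_py params)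

-- ===== LEMMAS AND PROOFS =====

-- A's fold step and B's two folds, named for the proofs
def pvStepA (g : PySem.Dict String (PySem.Dict String String)) (kv : String × String) :
    PySem.Dict String (PySem.Dict String String) :=
  let pn := pvSplitKey kv.1
  let g' := if g.contains pn.1 then g else g.insert pn.1 PySem.Dict.empty
  g'.modify pn.1 PySem.Dict.empty (fun d => d.insert pn.2 kv.2)

def pvPref (params : List (String × String)) : List String :=
  params.foldl (fun acc kv =>
    let p := (pvSplitKey kv.1).1
    if acc.contains p then acc else acc ++ [p]) []

def pvInner (params : List (String × String)) (p : String) : PySem.Dict String String :=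
  params.foldl (fun d kv =>
    let qn := pvSplitKey kv.1
    if qn.1 == p then d.insert qn.2 kv.2 else d) PySem.Dict.empty

theorem pvContains_map (L : List String) (g : String → PySem.Dict String String) (p : String) :
    (PySem.Dict.mk (L.map (fun q => (q, g q)))).contains p = decide (p ∈ L) := by
  induction L with
  | nil => rfl
  | cons q L ih =>
      simp only [PySem.Dict.contains, List.map_cons, List.any_cons] at *
      by_cases h : q = p <;> simp [h, Ne.symm, ih]

theorem pvGetD_map (L : List String) (g : String → PySem.Dict String String) (p : String)
    (d : PySem.Dict String String) :
    (PySem.Dict.mk (L.map (fun q => (q, g q)))).getD p d =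
      (if p ∈ L then g p else d) := by
  induction L with
  | nil => simp [PySem.Dict.getD, PySem.Dict.get?]
  | cons q L ih =>
      simp only [PySem.Dict.getD, PySem.Dict.get?, List.map_cons, List.find?_cons] at ih ⊢
      by_cases h : q = p
      · subst h; simp
      · have : ((q, g q).1 == p) = false := by simpa using h
        rw [this, ih]
        simp [List.mem_cons, Ne.symm h]

theorem pvPref_snoc (xs : List (String × String)) (kv : String × String) :
    pvPref (xs ++ [kv]) =
      (if (pvSplitKey kv.1).1 ∈ pvPref xs then pvPref xs
       else pvPref xs ++ [(pvSplitKey kv.1).1]) := by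
  simp [pvPref, List.foldl_append]

theorem pvInner_snoc (xs : List (String × String)) (kv : String × String) (p : String) :
    pvInner (xs ++ [kv]) p =
      (if (pvSplitKey kv.1).1 = p then (pvInner xs p).insert (pvSplitKey kv.1).2 kv.2
       else pvInner xs p) := by
  simp [pvInner, List.foldl_append]

theorem pvInner_empty (xs : List (String × String)) (p : String)
    (h : p ∉ pvPref xs) : pvInner xs p = PySem.Dict.empty := by
  induction xs using List.reverseRecOn with
  | nil => rfl
  | append_singleton xs kv ih =>
      rw [pvPref_snoc] at h
      rw [pvInner_snoc]
      by_cases hq : (pvSplitKey kv.1).1 ∈ pvPref xs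
      · rw [if_pos hq] at h
        rw [if_neg (by rintro rfl; exact h hq)]
        exact ih h
      · rw [if_neg hq] at h
        rw [if_neg (by rintro rfl; exact h (by simp))]
        exact ih (fun h' => h (List.mem_append_left _ h'))

theorem pvStepA_map (L : List String) (g : String → PySem.Dict String String)
    (kv : String × String) :
    pvStepA (PySem.Dict.mk (L.map (fun q => (q, g q)))) kv =
      (if (pvSplitKey kv.1).1 ∈ L then
        PySem.Dict.mk (L.map (fun q =>
          (q, if q == (pvSplitKey kv.1).1 then (g q).insert (pvSplitKey kv.1).2 kv.2 else g q)))
      else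
        PySem.Dict.mk (L.map (fun q => (q, g q)) ++
          [((pvSplitKey kv.1).1, PySem.Dict.empty.insert (pvSplitKey kv.1).2 kv.2)])) := by
  simp only [pvStepA]
  generalize pvSplitKey kv.1 = pn
  rw [pvContains_map]
  by_cases hp : pn.1 ∈ L
  · rw [if_pos (by simpa using hp), if_pos hp]
    rw [PySem.Dict.modify, pvGetD_map, if_pos hp, PySem.Dict.insert,
      if_pos (by rw [pvContains_map]; simpa using hp)]
    congr 1
    rw [List.map_map]
    apply List.map_congr_left
    intro q _
    by_cases h : q = pn.1
    · subst h; simp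
    · simp [h]
  · rw [if_neg (by simpa using hp), if_neg hp]
    rw [PySem.Dict.insert, if_neg (by rw [pvContains_map]; simpa using hp)]
    rw [PySem.Dict.modify]
    have hform : (L ++ [pn.1]).map (fun q => (q, if q ∈ L then g q else PySem.Dict.empty)) =
        L.map (fun q => (q, g q)) ++ [(pn.1, PySem.Dict.empty)] := by
      rw [List.map_append]
      congr 1
      · apply List.map_congr_left; intro q hq; simp [hq]
      · simp [hp]
    have hg : (PySem.Dict.mk ((L.map (fun q => (q, g q))) ++ [(pn.1, (PySem.Dict.empty : PySem.Dict String String))])).getD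
        pn.1 PySem.Dict.empty = PySem.Dict.empty := by
      rw [show (L.map (fun q => (q, g q))) ++ [(pn.1, (PySem.Dict.empty : PySem.Dict String String))] =
          (L ++ [pn.1]).map (fun q => (q, if q ∈ L then g q else PySem.Dict.empty)) from hform.symm]
      rw [pvGetD_map (L ++ [pn.1])]
      simp [hp]
    rw [hg, PySem.Dict.insert, if_pos (by simp [PySem.Dict.contains])]
    congr 1
    rw [List.map_append]
    congr 1
    · rw [List.map_map]
      apply List.map_congr_left
      intro q hq
      have h1 : ((q, g q).1 == pn.1) = false := by
        simp only [beq_eq_false_iff_ne, ne_eq]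
        intro h
        exact hp (h ▸ hq)
      simp only [Function.comp_apply]
      rw [h1]
      simp
    · simp

theorem pvMain (params : List (String × String)) :
    params.foldl pvStepA PySem.Dict.empty =
      PySem.Dict.mk ((pvPref params).map (fun p => (p, pvInner params p))) := by
  induction params using List.reverseRecOn with
  | nil => rfl
  | append_singleton xs kv ih =>
      rw [List.foldl_append, List.foldl_cons, List.foldl_nil, ih, pvStepA_map, pvPref_snoc]
      by_cases hp : (pvSplitKey kv.1).1 ∈ pvPref xs
      · rw [if_pos hp, if_pos hp]
        congr 1
        apply List.map_congr_left
        intro q hq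
        rw [pvInner_snoc]
        by_cases h : (pvSplitKey kv.1).1 = q
        · subst h; simp
        · rw [if_neg h]
          have : (q == (pvSplitKey kv.1).1) = false := by
            simpa using fun h' => h h'.symm
          rw [this]
          simp
      · rw [if_neg hp, if_neg hp]
        congr 1
        rw [List.map_append]
        congr 1
        · apply List.map_congr_left
          intro q hq
          rw [pvInner_snoc, if_neg (by rintro rfl; exact hp hq)]
        · rw [List.map_singleton, pvInner_snoc, if_pos rfl, pvInner_empty xs _ hp]

-- ===== VERDICT (by name: the statement is the Claim_ definition above) =====
theorem group_parameters_py_spec : Claim_equal_group_parameters_py := by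
  intro params _
  show group_parameters_py params = group_parameters_py_alt params
  have hA : group_parameters_py params =
      (params.foldl pvStepA PySem.Dict.empty).items.map (fun pd => (pd.1, pd.2.items)) := rfl
  have hB : group_parameters_py_alt params =
      (pvPref params).map (fun p => (p, (pvInner params p).items)) := rfl
  rw [hA, hB, pvMain]
  simp [List.map_map]
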